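-- pv_equiv track=rewrite | github.com/jungleistx/Python-Programming-MOOC-2023 | part05/04/oldest_person.py | oldest_person
-- ===== SOURCE A (Python) =====
-- def oldest_person(people: list):
--
-- 	year = people[0][1]
-- 	name = people[0][0]
-- 	for person in people:
-- 		if person[1] < year:
-- 			name = person[0]
-- 			year = person[1]
-- 	return name
-- ===== SOURCE B (Python) =====
-- def oldest_person(people: list):
--     # stable sort on birth year: first element attaining the minimum stays in front
--     return sorted(people, key=lambda p: p[1])[0][0]
-- ===== Notes on version B (the rewrite author's own statement) =====
-- stated objective: idiomatic
-- what changed: Replaces the manual min-tracking loop by a stable sort on the birth-year key and taking the first element's name; stability reproduces the strict-< first-wins tie-breaking.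
import Mathlib
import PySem

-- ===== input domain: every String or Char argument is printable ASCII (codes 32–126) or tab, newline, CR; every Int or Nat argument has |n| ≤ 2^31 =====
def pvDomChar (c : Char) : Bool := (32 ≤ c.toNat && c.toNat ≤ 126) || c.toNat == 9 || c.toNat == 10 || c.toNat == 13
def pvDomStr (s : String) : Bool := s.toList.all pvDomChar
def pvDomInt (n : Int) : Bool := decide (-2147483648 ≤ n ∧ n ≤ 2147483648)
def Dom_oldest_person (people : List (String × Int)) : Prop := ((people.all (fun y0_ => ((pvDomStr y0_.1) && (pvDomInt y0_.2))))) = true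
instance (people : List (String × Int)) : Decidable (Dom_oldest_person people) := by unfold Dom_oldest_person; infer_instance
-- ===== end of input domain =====

-- B replaces A's manual min-scan by a stable sort on the year key and takes the head's name.

-- ===== PORT A =====
-- manual scan: start from people[0], update (name, year) when person[1] < year
def oldest_person (people : List (String × Int)) : String :=
  match PySem.List.pyGet? people 0 with
  | none => ""  -- people[0] raises IndexError on []; excluded by Pre_
  | some p0 =>
    (people.foldl (fun (s : String × Int) person =>
        if person.2 < s.2 then (person.1, person.2) else s) (p0.1, p0.2)).1

-- ===== PORT B =====
-- sorted(people, key=lambda p: p[1])[0][0]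
def oldest_person_alt (people : List (String × Int)) : String :=
  match PySem.List.pyGet? (PySem.List.sorted people (fun p => p.2) false) 0 with
  | none => ""  -- sorted([])[0] raises IndexError on []; excluded by Pre_
  | some p => p.1

-- ===== PRECONDITION & SPEC =====
-- A raises IndexError on the empty list (people[0]); Pre_ excludes exactly that input.
def Pre_oldest_person (people : List (String × Int)) : Prop := people ≠ []
instance (people : List (String × Int)) : Decidable (Pre_oldest_person people) := by unfold Pre_oldest_person; infer_instance
def pvWitness_oldest_person : (List (String × Int)) := [("Adam", 1977), ("Ellen", 1985), ("Mary", 1953)]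
def Spec_oldest_person (people : List (String × Int)) (out : String) : Prop := out = oldest_person_alt people
instance (people : List (String × Int)) (out : String) : Decidable (Spec_oldest_person people out) := by unfold Spec_oldest_person; infer_instance

-- ===== CLAIM (what is proved, stated in full; the proofs are below) =====
def Claim_equal_oldest_person : Prop := ∀ (people : List (String × Int)), Dom_oldest_person people → Pre_oldest_person people → Spec_oldest_person people (oldest_person people)

-- ===== LEMMAS AND PROOFS =====

-- head of inserting into a nonempty accumulator = strict-< min update
lemma head_insertBy (x m : String × Int) (t : List (String × Int)) :
    (PySem.List.insertBy (fun a b => decide (a.2 < b.2)) x (m :: t)).head?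
      = some (if x.2 < m.2 then x else m) := by
  simp [PySem.List.insertBy]
  split_ifs <;> simp

-- invariant: the head of the insertion-sort accumulator is A's running first-minimum
lemma head_foldl_insert (xs : List (String × Int)) :
    ∀ (acc : List (String × Int)) (m : String × Int) (t : List (String × Int)), acc = m :: t →
    ((xs.foldl (fun acc x => PySem.List.insertBy (fun a b => decide (a.2 < b.2)) x acc) acc).head?)
      = some (xs.foldl (fun s x => if x.2 < s.2 then x else s) m) := by
  induction xs with
  | nil => intro acc m t h; simp [h]
  | cons x xs ih =>
      intro acc m t h
      subst h
      have hh := head_insertBy x m t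
      obtain ⟨m', t', hmt⟩ : ∃ m' t', PySem.List.insertBy (fun a b => decide (a.2 < b.2)) x (m :: t) = m' :: t' := by
        cases hli : PySem.List.insertBy (fun a b => decide (a.2 < b.2)) x (m :: t) with
        | nil => rw [hli] at hh; simp at hh
        | cons a b => exact ⟨a, b, rfl⟩
      have hm' : m' = if x.2 < m.2 then x else m := by
        rw [hmt] at hh; simpa using hh
      simp only [List.foldl_cons]
      rw [ih _ m' t' hmt, hm']

-- ===== VERDICT (by name: the statement is the Claim_ definition above) =====
theorem oldest_person_spec : Claim_equal_oldest_person := by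
  intro people _ hpre
  obtain ⟨p, ps, rfl⟩ := List.exists_cons_of_ne_nil hpre
  unfold Spec_oldest_person oldest_person oldest_person_alt
  have hsorted :
      ((PySem.List.sorted (p :: ps) (fun q => q.2) false).head?)
        = some (ps.foldl (fun s x => if x.2 < s.2 then x else s) p) := by
    rw [PySem.List.sorted_eq_foldl_insertBy]
    simp only [List.foldl_cons]
    exact head_foldl_insert ps _ p [] (by simp [PySem.List.insertBy])
  obtain ⟨t', ht⟩ : ∃ t', PySem.List.sorted (p :: ps) (fun q => q.2) false
      = (ps.foldl (fun s x => if x.2 < s.2 then x else s) p) :: t' := by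
    cases hs : PySem.List.sorted (p :: ps) (fun q => q.2) false with
    | nil => rw [hs] at hsorted; simp at hsorted
    | cons a b =>
        rw [hs] at hsorted
        exact ⟨b, by simpa using congrArg (List.cons · b) (by simpa using hsorted : a = _)⟩
  rw [ht]
  simp [PySem.List.pyGet?, PySem.List.pyIdx?]
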